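-- pv_equiv track=rewrite | github.com/sanjeevranjan-singh/flash-agent | mcp/parsers.py | split_event_blocks
-- ===== SOURCE A (Python) =====
-- from typing import Any, Dict, List
--
-- def split_event_blocks(events_text: str) -> List[List[str]]:
--     """
--     Split MCP events_list output into one logical block per event.
--
--     Handles three shapes returned by kubernetes-mcp-server:
--       (A) YAML-list shape (most common): each event is a list item that begins
--           with a line starting with "- " at column 0; subsequent fields are
--           indented (e.g. "  Reason: Unhealthy"). NO blank lines between items.
--       (B) Blank-line separated YAML-ish blocks.
--       (C) kubectl-style table: one line per event with TYPE/REASON/OBJECT/MSG.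
--
--     Previously, only (B) and (C) were handled. The live cluster returns (A),
--     so the splitter saw every "Reason:", "Type:", "Message:" line as its OWN
--     one-line "block" and the warning detection only matched isolated
--     "Type: Warning" lines while their Reason/Message lived in different blocks.
--     """
--     raw = (events_text or "").strip()
--     if not raw:
--         return []
--
--     lines = raw.splitlines()
--
--     # Detect YAML-list shape: any line starts with "- " at col 0 (and is not the
--     # leading "# ..." comment that some MCP servers prepend).
--     yaml_list_idx = [
--         i for i, l in enumerate(lines) if l.startswith("- ")
--     ]
--     if yaml_list_idx:
--         blocks: List[List[str]] = []
--         current: List[str] = []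
--         for line in lines:
--             if not line.strip() or line.lstrip().startswith("#"):
--                 continue
--             if line.startswith("- "):
--                 if current:
--                     blocks.append(current)
--                 current = [line]
--             else:
--                 if current:
--                     current.append(line)
--                 # else: stray pre-amble, skip
--         if current:
--             blocks.append(current)
--         return blocks
--
--     # Blank-line separated blocks
--     if "\n\n" in raw:
--         blocks = []
--         for chunk in raw.split("\n\n"):
--             block = [l for l in chunk.splitlines() if l.strip()]
--             if block:
--                 blocks.append(block)
--         return blocks
--
--     # Table shape: one line per event
--     blocks = []
--     for line in lines:
--         if not line.strip() or line.startswith("NAMESPACE") or line.lstrip().startswith("#"):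
--             continue
--         blocks.append([line])
--     return blocks
-- ===== SOURCE B (Python) =====
-- from typing import List
--
--
-- def split_event_blocks(events_text: str) -> List[List[str]]:
--     raw = (events_text or "").strip()
--     if not raw:
--         return []
--
--     lines = raw.splitlines()
--
--     # Drop blank and comment lines once, up front.
--     kept = [l for l in lines if l.strip() and not l.lstrip().startswith("#")]
--
--     if any(l.startswith("- ") for l in kept):
--         # Scan backwards: each "- " marker closes the block made of itself
--         # plus the lines collected below it; lines below the last marker that
--         # precede the first marker are dropped as preamble (they end in `tail`).
--         blocks: List[List[str]] = []
--         tail: List[str] = []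
--         for l in reversed(kept):
--             if l.startswith("- "):
--                 blocks.append([l] + tail)
--                 tail = []
--             else:
--                 tail = [l] + tail
--         blocks.reverse()
--         return blocks
--
--     if "\n\n" in raw:
--         chunks = [[l for l in c.splitlines() if l.strip()] for c in raw.split("\n\n")]
--         return [b for b in chunks if b]
--
--     return [[l] for l in lines
--             if l.strip() and not l.startswith("NAMESPACE") and not l.lstrip().startswith("#")]
-- ===== Notes on version B (the rewrite author's own statement) =====
-- stated objective: alternative
-- what changed: The YAML-list branch's forward stateful accumulator (skip-inside-loop, flush-current-on-marker, final flush) is replaced by one up-front blank/comment filter followed by a backward scan in which each '- ' marker closes the block of itself plus the collected tail (preamble lines are dropped as the leftover tail); the blank-line and table branches become map/filter pipelines instead of append loops.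
import Mathlib
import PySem

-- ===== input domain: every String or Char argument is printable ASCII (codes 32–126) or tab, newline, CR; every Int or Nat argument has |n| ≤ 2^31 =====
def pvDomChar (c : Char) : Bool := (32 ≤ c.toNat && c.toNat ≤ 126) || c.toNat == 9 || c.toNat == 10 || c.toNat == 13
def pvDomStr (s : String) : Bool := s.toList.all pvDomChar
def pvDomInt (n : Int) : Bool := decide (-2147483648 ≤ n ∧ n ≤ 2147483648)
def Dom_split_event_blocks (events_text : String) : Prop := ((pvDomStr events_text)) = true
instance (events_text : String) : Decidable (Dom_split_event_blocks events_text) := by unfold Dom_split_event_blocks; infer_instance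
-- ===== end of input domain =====

-- B replaces A's forward stateful block accumulator in the YAML branch by a single up-front
-- blank/comment filter followed by a backward scan in which each "- " marker closes its block,
-- and expresses the blank-line and table branches as map/filter pipelines (objective: alternative).

-- ===== PORT A =====
def split_event_blocks (events_text : String) : List (List String) :=
  let raw := PySem.Str.strip events_text
  if raw == "" then []
  else
    let lines := PySem.Str.splitlines raw
    let yaml_list_idx :=
      ((PySem.List.enumerate lines).filter (fun p => PySem.Str.startswith p.2 "- ")).map (·.1)
    if !yaml_list_idx.isEmpty then
      let st := lines.foldl (fun (st : List (List String) × List String) line =>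
        if (PySem.Str.strip line == "") || PySem.Str.startswith (PySem.Str.lstrip line) "#" then
          st
        else if PySem.Str.startswith line "- " then
          ((if st.2.isEmpty then st.1 else st.1 ++ [st.2]), [line])
        else
          (st.1, if st.2.isEmpty then st.2 else st.2 ++ [line])) ([], [])
      if st.2.isEmpty then st.1 else st.1 ++ [st.2]
    else if PySem.Str.isIn "\n\n" raw then
      ((PySem.Str.split? raw "\n\n").getD []).foldl (fun blocks chunk =>
        let block := (PySem.Str.splitlines chunk).filter (fun l => !(PySem.Str.strip l == ""))
        if block.isEmpty then blocks else blocks ++ [block]) []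
    else
      lines.foldl (fun blocks line =>
        if (PySem.Str.strip line == "") || PySem.Str.startswith line "NAMESPACE"
            || PySem.Str.startswith (PySem.Str.lstrip line) "#" then
          blocks
        else blocks ++ [[line]]) []

-- ===== PORT B =====
def split_event_blocks_alt (events_text : String) : List (List String) :=
  let raw := PySem.Str.strip events_text
  if raw == "" then []
  else
    let lines := PySem.Str.splitlines raw
    let kept := lines.filter (fun l =>
      !(PySem.Str.strip l == "") && !PySem.Str.startswith (PySem.Str.lstrip l) "#")
    if kept.any (fun l => PySem.Str.startswith l "- ") then
      -- backward scan: each "- " marker closes the block of itself plus the collected tail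
      let st := kept.reverse.foldl (fun (st : List (List String) × List String) l =>
        if PySem.Str.startswith l "- " then (st.1 ++ [l :: st.2], [])
        else (st.1, l :: st.2)) ([], [])
      st.1.reverse
    else if PySem.Str.isIn "\n\n" raw then
      (((PySem.Str.split? raw "\n\n").getD []).map (fun c =>
        (PySem.Str.splitlines c).filter (fun l => !(PySem.Str.strip l == "")))).filter
        (fun b => !b.isEmpty)
    else
      (lines.filter (fun l =>
        !(PySem.Str.strip l == "") && !PySem.Str.startswith l "NAMESPACE"
          && !PySem.Str.startswith (PySem.Str.lstrip l) "#")).map (fun l => [l])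

-- ===== PRECONDITION & SPEC =====
def Spec_split_event_blocks (events_text : String) (out : List (List String)) : Prop := out = split_event_blocks_alt events_text
instance (events_text : String) (out : List (List String)) : Decidable (Spec_split_event_blocks events_text out) := by unfold Spec_split_event_blocks; infer_instance

-- ===== CLAIM (what is proved, stated in full; the proofs are below) =====
def Claim_equal_split_event_blocks : Prop := ∀ (events_text : String), Dom_split_event_blocks events_text → Spec_split_event_blocks events_text (split_event_blocks events_text)

-- ===== LEMMAS AND PROOFS =====

-- A's step in the YAML branch, once blank/comment lines are gone (generic in the marker test)
def pvStepA {α : Type} (m : α → Bool) (st : List (List α) × List α) (l : α) :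
    List (List α) × List α :=
  if m l then ((if st.2.isEmpty then st.1 else st.1 ++ [st.2]), [l])
  else (st.1, if st.2.isEmpty then st.2 else st.2 ++ [l])

-- the common specification: tail before the first marker, blocks cut at markers
def pvTl {α : Type} (m : α → Bool) : List α → List α
  | [] => []
  | l :: r => if m l then [] else l :: pvTl m r

def pvBf {α : Type} (m : α → Bool) : List α → List (List α)
  | [] => []
  | l :: r => if m l then (l :: pvTl m r) :: pvBf m r else pvBf m r

theorem pvB1 {α : Type} (m : α → Bool) (ks : List α) :
    ks.foldr (fun l (st : List (List α) × List α) =>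
        if m l then (st.1 ++ [l :: st.2], []) else (st.1, l :: st.2)) ([], [])
      = ((pvBf m ks).reverse, pvTl m ks) := by
  induction ks with
  | nil => simp [pvBf, pvTl]
  | cons l r ih => by_cases h : m l <;> simp [pvBf, pvTl, ih, h]

theorem pvA1 {α : Type} (m : α → Bool) (t : List α) (bs cur : _) :
    t.foldl (pvStepA m) (bs, cur)
      = (bs ++ (t.foldl (pvStepA m) ([], cur)).1, (t.foldl (pvStepA m) ([], cur)).2) := by
  induction t generalizing bs cur with
  | nil => simp
  | cons l r ih =>
    by_cases h : m l
    · simp only [List.foldl_cons, pvStepA, h, if_true]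
      rw [ih (if cur.isEmpty then bs else bs ++ [cur]) [l],
        ih (if cur.isEmpty then [] else [] ++ [cur]) [l]]
      by_cases hc : cur.isEmpty <;> simp [hc]
    · simp only [List.foldl_cons, pvStepA, h]
      exact ih bs _

theorem pvA2 {α : Type} (m : α → Bool) (t : List α) (cur : List α) :
    (if (t.foldl (pvStepA m) ([], cur)).2.isEmpty then (t.foldl (pvStepA m) ([], cur)).1
     else (t.foldl (pvStepA m) ([], cur)).1 ++ [(t.foldl (pvStepA m) ([], cur)).2])
      = (if cur.isEmpty then [] else [cur ++ pvTl m t]) ++ pvBf m t := by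
  induction t generalizing cur with
  | nil => by_cases hc : cur.isEmpty <;> simp [pvTl, pvBf, hc]
  | cons l r ih =>
    have hfin : ∀ (a : List (List α)) (x : List (List α) × List α),
        (if x.2.isEmpty then a ++ x.1 else a ++ x.1 ++ [x.2])
          = a ++ (if x.2.isEmpty then x.1 else x.1 ++ [x.2]) := by
      intro a x; by_cases hx : x.2.isEmpty <;> simp [hx]
    by_cases h : m l
    · simp only [List.foldl_cons, pvStepA, h, if_true]
      rw [pvA1]
      dsimp only
      rw [hfin]
      have h1 := ih [l]
      simp only [List.isEmpty_cons, Bool.false_eq_true, if_false] at h1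
      rw [h1]
      by_cases hc : cur.isEmpty <;> simp [hc, pvTl, pvBf, h]
    · simp only [List.foldl_cons, pvStepA, h, Bool.false_eq_true, if_false]
      by_cases hc : cur.isEmpty
      · simp only [hc, if_true]
        rw [ih]
        simp [pvBf, h, hc]
      · simp only [hc, Bool.false_eq_true, if_false]
        rw [ih (cur ++ [l])]
        simp [pvTl, pvBf, h]

-- the whole YAML branch, generic in the marker test
theorem pvYaml {α : Type} (m : α → Bool) (ks : List α) :
    (if (ks.foldl (pvStepA m) ([], [])).2.isEmpty then (ks.foldl (pvStepA m) ([], [])).1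
     else (ks.foldl (pvStepA m) ([], [])).1 ++ [(ks.foldl (pvStepA m) ([], [])).2])
      = ((ks.reverse.foldl (fun (st : List (List α) × List α) l =>
            if m l then (st.1 ++ [l :: st.2], []) else (st.1, l :: st.2)) ([], [])).1).reverse := by
  rw [pvA2, List.foldl_reverse]
  have := pvB1 m ks
  simp only [this]
  simp

-- a "- " line is neither blank nor a comment
theorem pvMarkerKept (l : String) (h : PySem.Str.startswith l "- " = true) :
    (PySem.Str.strip l == "") = false
      ∧ PySem.Str.startswith (PySem.Str.lstrip l) "#" = false := by
  rw [PySem.Str.startswith_eq, PySem.Chars.startswith_iff] at h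
  obtain ⟨t, ht⟩ := h
  have ht' : l.toList = '-' :: ' ' :: t := by simpa using ht.symm
  constructor
  · have hne : PySem.Str.strip l ≠ "" := by
      intro he
      have : (PySem.Str.strip l).toList = [] := by rw [he]; rfl
      rw [PySem.Str.toList_strip, ht'] at this
      simp only [PySem.Chars.strip, PySem.Chars.lstrip, PySem.Chars.rstrip] at this
      rw [List.dropWhile_cons] at this
      simp only [show PySem.Chars.isspace '-' = false from rfl, Bool.false_eq_true,
        if_false] at this
      rw [List.reverse_eq_nil_iff, List.dropWhile_eq_nil_iff] at this
      have hmem : '-' ∈ ('-' :: ' ' :: t).reverse := by simp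
      have := this _ hmem
      simp [show PySem.Chars.isspace '-' = false from rfl] at this
    exact beq_eq_false_iff_ne.mpr hne
  · rw [PySem.Str.startswith_eq]
    have hl : (PySem.Str.lstrip l).toList = '-' :: ' ' :: t := by
      rw [PySem.Str.toList_lstrip, ht']
      simp only [PySem.Chars.lstrip]
      rw [List.dropWhile_cons]
      simp [show PySem.Chars.isspace '-' = false from rfl]
    rw [hl]
    simp [PySem.Chars.startswith, List.isPrefixOf, show "#".toList = ['#'] from rfl]

theorem pvEnumDetect {β : Type} (m : β → Bool) (xs : List β) (s : Int) :
    (((PySem.List.enumerate xs s).filter (fun p => m p.2)).map (·.1)).isEmpty = !xs.any m := by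
  induction xs generalizing s with
  | nil => simp [PySem.List.enumerate]
  | cons x r ih =>
    rw [PySem.List.enumerate_cons]
    by_cases h : m x <;> simp [h, ih]

theorem pvFilterAny {β : Type} (m k : β → Bool) (h : ∀ l, m l = true → k l = true)
    (xs : List β) : (xs.filter k).any m = xs.any m := by
  induction xs with
  | nil => rfl
  | cons x r ih =>
    by_cases hm : m x
    · have := h x hm; simp [this, hm]
    · by_cases hk : k x <;> simp [hk, hm, ih]

theorem pvFoldIf {β γ : Type} (f : β → List γ) (cs : List β) (acc : List (List γ)) :
    cs.foldl (fun acc c => if (f c).isEmpty then acc else acc ++ [f c]) acc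
      = acc ++ ((cs.map f).filter (fun b => !b.isEmpty)) := by
  induction cs generalizing acc with
  | nil => simp
  | cons c r ih =>
    simp only [List.foldl_cons]
    by_cases h : (f c).isEmpty
    · rw [if_pos h, ih]
      simp [h]
    · rw [if_neg h, ih]
      simp at h
      simp [h]

theorem pvFoldSingle {β : Type} (p : β → Bool) (ls : List β) (acc : List (List β)) :
    ls.foldl (fun acc l => if p l then acc else acc ++ [[l]]) acc
      = acc ++ (ls.filter (fun l => !p l)).map (fun l => [l]) := by
  induction ls generalizing acc with
  | nil => simp
  | cons l r ih =>
    simp only [List.foldl_cons]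
    by_cases h : p l
    · rw [if_pos h, ih]
      simp [h]
    · rw [if_neg h, ih]
      simp at h
      simp [h]

-- ===== VERDICT (by name: the statement is the Claim_ definition above) =====
theorem split_event_blocks_spec : Claim_equal_split_event_blocks := by
  intro s _
  unfold Spec_split_event_blocks split_event_blocks split_event_blocks_alt
  by_cases hr : (PySem.Str.strip s == "") = true
  · simp [hr]
  · simp only [hr, Bool.false_eq_true, if_false]
    generalize PySem.Str.splitlines (PySem.Str.strip s) = L
    generalize (PySem.Str.split? (PySem.Str.strip s) "\n\n").getD [] = C
    generalize PySem.Str.isIn "\n\n" (PySem.Str.strip s) = b2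
    have hmk : ∀ l : String, PySem.Str.startswith l "- " = true →
        (!(PySem.Str.strip l == "") && !PySem.Str.startswith (PySem.Str.lstrip l) "#") = true := by
      intro l hl
      obtain ⟨h1, h2⟩ := pvMarkerKept l hl
      rw [h1, h2]
      rfl
    have hdet : (((PySem.List.enumerate L).filter
          (fun p => PySem.Str.startswith p.2 "- ")).map (·.1)).isEmpty
        = !((L.filter (fun l =>
            !(PySem.Str.strip l == "") && !PySem.Str.startswith (PySem.Str.lstrip l) "#")).any
            (fun l => PySem.Str.startswith l "- ")) := by
      rw [pvEnumDetect (fun l => PySem.Str.startswith l "- ") L 0,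
        pvFilterAny (fun l => PySem.Str.startswith l "- ") _ hmk]
    by_cases hy : ((L.filter (fun l =>
        !(PySem.Str.strip l == "") && !PySem.Str.startswith (PySem.Str.lstrip l) "#")).any
        (fun l => PySem.Str.startswith l "- ")) = true
    · have h1 : (((PySem.List.enumerate L).filter
          (fun p => PySem.Str.startswith p.2 "- ")).map (·.1)).isEmpty = false := by
        rw [hdet, hy]
        rfl
      simp only [h1, hy, Bool.not_false, if_true]
      have hfold : L.foldl (fun (st : List (List String) × List String) line =>
          if (PySem.Str.strip line == "") || PySem.Str.startswith (PySem.Str.lstrip line) "#" then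
            st
          else if PySem.Str.startswith line "- " then
            ((if st.2.isEmpty then st.1 else st.1 ++ [st.2]), [line])
          else
            (st.1, if st.2.isEmpty then st.2 else st.2 ++ [line])) ([], [])
          = (L.filter (fun l =>
              !(PySem.Str.strip l == "") && !PySem.Str.startswith (PySem.Str.lstrip l) "#")).foldl
              (pvStepA (fun l => PySem.Str.startswith l "- ")) ([], []) := by
        rw [List.foldl_filter]
        apply PySem.List.foldl_congr_mem
        intro acc x _
        unfold pvStepA
        by_cases h1 : (PySem.Str.strip x == "") = true <;>
          by_cases h2 : PySem.Str.startswith (PySem.Str.lstrip x) "#" = true <;>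
            simp only [h1, h2] <;> simp
      rw [hfold]
      exact pvYaml _ _
    · rw [Bool.not_eq_true] at hy
      have h1 : (((PySem.List.enumerate L).filter
          (fun p => PySem.Str.startswith p.2 "- ")).map (·.1)).isEmpty = true := by
        rw [hdet, hy]
        rfl
      simp only [h1, hy, Bool.not_true, Bool.false_eq_true, if_false]
      by_cases hnn : b2 = true
      · simp only [hnn, if_true]
        have := pvFoldIf (fun c =>
          (PySem.Str.splitlines c).filter (fun l => !(PySem.Str.strip l == ""))) C []
        simpa using this
      · simp only [hnn, Bool.false_eq_true, if_false]
        have := pvFoldSingle (fun line =>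
          (PySem.Str.strip line == "") || PySem.Str.startswith line "NAMESPACE"
            || PySem.Str.startswith (PySem.Str.lstrip line) "#") L []
        rw [this, List.nil_append]
        congr 1
        apply List.filter_congr
        intro l _
        by_cases k1 : (PySem.Str.strip l == "") = true <;>
          by_cases k2 : PySem.Str.startswith l "NAMESPACE" = true <;>
            by_cases k3 : PySem.Str.startswith (PySem.Str.lstrip l) "#" = true <;>
              simp only [k1, k2, k3] <;> simp
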